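-- pv_equiv track=rewrite | github.com/Matt-J-Jones/python-exercises | locomotive-engineer/locomotive_engineer.py | fix_wagon_depot
-- ===== SOURCE A (Python) =====
-- def fix_wagon_depot(wagons_rows):
--     """Fix the list of rows of wagons.
--
--     :param wagons_rows: list[list[tuple]] - the list of rows of wagons.
--     :return: list[list[tuple]] - list of rows of wagons.
--     """
--     # [*all_trains] = zip(*wagons_rows)
--     # fix_depot_information = []
--     # return fix_depot_information
--     mixed_rows = []
--     for row in wagons_rows:
--         [*temp_row] = zip(*row)
--         mixed_rows.append(temp_row)
--     ordered_rows = []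
--     row_count = [0,1,2]
--     for count in row_count:
--         ordered_rows.append([
--             (mixed_rows[0][0][count], mixed_rows[0][1][0]),
--             (mixed_rows[1][0][count], mixed_rows[1][1][0]),
--             (mixed_rows[2][0][count], mixed_rows[2][1][0])])
--     return ordered_rows
-- ===== SOURCE B (Python) =====
-- def fix_wagon_depot(wagons_rows):
--     """Fix the list of rows of wagons.
--
--     Single pass over the first three depot rows, growing the three output
--     rows simultaneously (no intermediate transpose)."""
--     out = [[], [], []]
--     for row in wagons_rows[:3]:
--         second = row[0][1]
--         for count, dest in enumerate(out):
--             dest.append((row[count][0], second))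
--     return out
-- ===== Notes on version B (the rewrite author's own statement) =====
-- stated objective: alternative
-- what changed: B replaces A's two staged passes (zip-transpose every row, then assemble output column-by-column from the transposed tables) with one pass over the first three input rows that grows all three output rows simultaneously via accumulators.
import Mathlib
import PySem

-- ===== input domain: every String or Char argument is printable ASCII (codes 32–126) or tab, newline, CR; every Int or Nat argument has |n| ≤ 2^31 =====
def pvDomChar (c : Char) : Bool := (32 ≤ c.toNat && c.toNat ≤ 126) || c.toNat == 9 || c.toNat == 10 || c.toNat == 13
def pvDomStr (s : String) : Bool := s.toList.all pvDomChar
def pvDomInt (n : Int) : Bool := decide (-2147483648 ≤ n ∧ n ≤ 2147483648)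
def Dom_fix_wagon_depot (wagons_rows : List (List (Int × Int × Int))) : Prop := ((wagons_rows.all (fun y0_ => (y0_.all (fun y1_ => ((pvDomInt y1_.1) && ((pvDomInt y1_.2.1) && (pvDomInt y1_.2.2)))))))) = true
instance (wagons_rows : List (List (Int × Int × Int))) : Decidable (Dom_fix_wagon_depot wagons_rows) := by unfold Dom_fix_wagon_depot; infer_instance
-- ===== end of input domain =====

-- B replaces A's staged transpose-then-assemble with one pass over the first three rows growing
-- all three output rows via accumulators; return values proved equal on Pre_.

-- ===== PORT A =====
-- zip(*row) for a list of 3-tuples: empty iterator for an empty row, else the three component lists.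
def pvZipStar (row : List (Int × Int × Int)) : List (List Int) :=
  if row = [] then []
  else [row.map (fun t => t.1), row.map (fun t => t.2.1), row.map (fun t => t.2.2)]

def fix_wagon_depot (wagons_rows : List (List (Int × Int × Int))) : List (List (Int × Int)) :=
  let mixed_rows := wagons_rows.foldl (fun acc row => acc ++ [pvZipStar row]) []
  -- indexing mixed_rows[i][j][k]; the default is never reached on Pre_ (Python raises IndexError there)
  let g := fun (i j k : Nat) => ((mixed_rows.getD i []).getD j []).getD k 0
  let row_count : List Nat := [0, 1, 2]
  row_count.foldl (fun acc count =>
    acc ++ [[(g 0 0 count, g 0 1 0), (g 1 0 count, g 1 1 0), (g 2 0 count, g 2 1 0)]]) []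

-- ===== PORT B =====
-- one pass over wagons_rows[:3]; out starts as [[],[],[]]; for each row, append
-- (row[count][0], row[0][1]) to out[count] for every count (Python's inner enumerate loop).
def fix_wagon_depot_alt (wagons_rows : List (List (Int × Int × Int))) : List (List (Int × Int)) :=
  (PySem.List.slice wagons_rows none (some 3)).foldl
    (fun out row =>
      let second := ((PySem.List.pyGet? row 0).getD (0, 0, 0)).2.1
      (PySem.List.enumerate out).map (fun p =>
        p.2 ++ [(((PySem.List.pyGet? row p.1).getD (0, 0, 0)).1, second)]))
    [[], [], []]

-- ===== PRECONDITION & SPEC =====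
-- Pre_ excludes exactly the inputs on which A raises IndexError: fewer than 3 rows, or one of the
-- first three rows shorter than 3 wagons.
def Pre_fix_wagon_depot (wagons_rows : List (List (Int × Int × Int))) : Prop :=
  3 ≤ wagons_rows.length ∧ 3 ≤ (wagons_rows.getD 0 []).length ∧
  3 ≤ (wagons_rows.getD 1 []).length ∧ 3 ≤ (wagons_rows.getD 2 []).length
instance (wagons_rows : List (List (Int × Int × Int))) : Decidable (Pre_fix_wagon_depot wagons_rows) := by unfold Pre_fix_wagon_depot; infer_instance

def pvWitness_fix_wagon_depot : (List (List (Int × Int × Int))) :=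
  [[(1, 2, 3), (4, 5, 6), (7, 8, 9)],
   [(10, 11, 12), (13, 14, 15), (16, 17, 18)],
   [(19, 20, 21), (22, 23, 24), (25, 26, 27)]]

def Spec_fix_wagon_depot (wagons_rows : List (List (Int × Int × Int))) (out : List (List (Int × Int))) : Prop := out = fix_wagon_depot_alt wagons_rows
instance (wagons_rows : List (List (Int × Int × Int))) (out : List (List (Int × Int))) : Decidable (Spec_fix_wagon_depot wagons_rows out) := by unfold Spec_fix_wagon_depot; infer_instance

-- ===== CLAIM =====
def Claim_equal_fix_wagon_depot : Prop := ∀ (wagons_rows : List (List (Int × Int × Int))), Dom_fix_wagon_depot wagons_rows → Pre_fix_wagon_depot wagons_rows → Spec_fix_wagon_depot wagons_rows (fix_wagon_depot wagons_rows)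

-- ===== LEMMAS AND PROOFS =====
theorem pvFoldlSnoc {A B : Type} (f : A → B) (l : List A) (acc : List B) :
    l.foldl (fun a r => a ++ [f r]) acc = acc ++ l.map f := by
  induction l generalizing acc with
  | nil => simp
  | cons x xs ih => simp [List.foldl, ih]

-- ===== VERDICT =====
theorem fix_wagon_depot_spec : Claim_equal_fix_wagon_depot := by
  intro w _ hpre
  obtain ⟨hl, h0, h1, h2⟩ := hpre
  match w, hl with
  | r0 :: r1 :: r2 :: rest, _ =>
    simp only [List.getD, List.getElem?_cons_zero, List.getElem?_cons_succ, Option.getD_some] at h0 h1 h2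
    match r0, h0 with
    | a0 :: a1 :: a2 :: t0, _ =>
    match r1, h1 with
    | b0 :: b1 :: b2 :: t1, _ =>
    match r2, h2 with
    | c0 :: c1 :: c2 :: t2, _ =>
      show Spec_fix_wagon_depot _ _
      unfold Spec_fix_wagon_depot fix_wagon_depot fix_wagon_depot_alt
      rw [pvFoldlSnoc pvZipStar, PySem.List.slice_to]
      have pos2 : ∀ (n : ℕ), (0:Int) ≤ (n:Int) + 1 + 1 := fun n => by omega
      have pos1 : ∀ (n : ℕ), (0:Int) ≤ (n:Int) + 1 := fun n => by omega
      have pos2' : ∀ (n : ℕ), (2:Int) ≤ (n:Int) + 1 + 1 := fun n => by omega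
      simp [List.foldl, List.take, pvZipStar, List.getD,
        PySem.List.enumerate, PySem.List.pyGet?, PySem.List.pyIdx?,
        pos2, pos1, pos2']
      norm_num
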